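-- pv_equiv track=rewrite | github.com/tovarich86/RAG_GRADIO | app.py | expand_search_terms
-- ===== SOURCE A (Python) =====
-- def expand_search_terms(base_term: str, kb: dict) -> list[str]:
--     base_term_lower = base_term.lower()
--     expanded_terms = {base_term_lower}
--     for section, topics in kb.items():
--         for topic, aliases in topics.items():
--             all_terms_in_group = {alias.lower() for alias in aliases} | {topic.lower().replace('_', ' ')}
--             if base_term_lower in all_terms_in_group:
--                 expanded_terms.update(all_terms_in_group)
--     return list(expanded_terms)
-- ===== SOURCE B (Python) =====
-- def expand_search_terms(base_term: str, kb: dict) -> list[str]: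
--     # Build an index term -> union of all alias groups containing it, then one lookup.
--     index = {}
--     for topics in kb.values():
--         for topic, aliases in topics.items():
--             group = {alias.lower() for alias in aliases} | {topic.lower().replace('_', ' ')}
--             for term in group:
--                 index.setdefault(term, set()).update(group)
--     base_term_lower = base_term.lower()
--     return list({base_term_lower} | index.get(base_term_lower, set()))
-- ===== Notes on version B (the rewrite author's own statement) =====
-- stated objective: alternative
-- what changed: Replaces the scan-and-test-each-group strategy (membership test inside the kb loop, conditional set update) by a build-a-table-then-lookup strategy: one pass builds an index from every term to the union of all groups containing it, and the answer is a single dictionary lookup unioned with the base term.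
import Mathlib
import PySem

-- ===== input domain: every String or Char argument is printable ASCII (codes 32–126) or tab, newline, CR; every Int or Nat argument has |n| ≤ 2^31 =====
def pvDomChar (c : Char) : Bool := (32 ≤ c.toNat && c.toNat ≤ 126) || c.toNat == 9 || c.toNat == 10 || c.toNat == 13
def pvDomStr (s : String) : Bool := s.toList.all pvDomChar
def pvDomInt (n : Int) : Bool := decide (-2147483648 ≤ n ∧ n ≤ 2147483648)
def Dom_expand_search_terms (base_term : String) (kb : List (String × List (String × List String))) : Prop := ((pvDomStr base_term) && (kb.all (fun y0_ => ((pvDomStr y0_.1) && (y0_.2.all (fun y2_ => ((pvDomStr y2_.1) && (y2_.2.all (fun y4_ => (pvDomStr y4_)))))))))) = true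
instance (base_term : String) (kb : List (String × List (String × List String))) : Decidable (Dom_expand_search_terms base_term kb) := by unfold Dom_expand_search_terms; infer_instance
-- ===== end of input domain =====

-- B builds a term→group-union index in one pass and answers by a single lookup,
-- instead of A's membership test inside the kb scan (objective: alternative decomposition).


-- all_terms_in_group = {alias.lower() for alias in aliases} | {topic.lower().replace('_', ' ')}
def pvGroup (topic : String) (aliases : List String) : PySem.Set String :=
  PySem.Set.union (PySem.Set.ofList (aliases.map PySem.Str.lower))
    (PySem.Set.ofList [PySem.Str.replace (PySem.Str.lower topic) "_" " "])

-- ===== PORT A =====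
-- returns list(expanded_terms): the Set's elements (first-insertion order; compared as a set)
def expand_search_terms (base_term : String) (kb : List (String × List (String × List String))) : List String :=
  let base_term_lower := PySem.Str.lower base_term
  kb.foldl (fun expanded_terms sec =>
    sec.2.foldl (fun expanded_terms ta =>
      let all_terms_in_group := pvGroup ta.1 ta.2
      if PySem.Set.contains all_terms_in_group base_term_lower then
        PySem.Set.update expanded_terms all_terms_in_group
      else expanded_terms) expanded_terms)
    (PySem.Set.ofList [base_term_lower])

-- ===== PORT B =====
def expand_search_terms_alt (base_term : String) (kb : List (String × List (String × List String))) : List String :=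
  let index : PySem.Dict String (PySem.Set String) :=
    kb.foldl (fun index sec =>
      sec.2.foldl (fun index ta =>
        let group := pvGroup ta.1 ta.2
        group.foldl (fun index term =>
          index.modify term PySem.Set.empty (fun s => PySem.Set.update s group)) index)
      index) PySem.Dict.empty
  let base_term_lower := PySem.Str.lower base_term
  PySem.Set.union (PySem.Set.ofList [base_term_lower]) (index.getD base_term_lower PySem.Set.empty)

-- ===== PRECONDITION & SPEC =====
def Spec_expand_search_terms (base_term : String) (kb : List (String × List (String × List String))) (out : List String) : Prop := out = expand_search_terms_alt base_term kb
instance (base_term : String) (kb : List (String × List (String × List String))) (out : List String) : Decidable (Spec_expand_search_terms base_term kb out) := by unfold Spec_expand_search_terms; infer_instance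

-- ===== CLAIM (what is proved, stated in full; the proofs are below) =====
def Claim_equal_expand_search_terms : Prop := ∀ (base_term : String) (kb : List (String × List (String × List String))), Dom_expand_search_terms base_term kb → Spec_expand_search_terms base_term kb (expand_search_terms base_term kb)

-- ===== LEMMAS AND PROOFS =====

theorem pv_update_add (s t : PySem.Set String) (x : String) :
    PySem.Set.update s (PySem.Set.add t x) = PySem.Set.add (PySem.Set.update s t) x := by
  by_cases hx : x ∈ t
  · rw [PySem.Set.add_of_mem hx,
      PySem.Set.add_of_mem ((PySem.Set.mem_update s t x).mpr (Or.inr hx))]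
  · rw [PySem.Set.add_of_not_mem hx, PySem.Set.update_append, PySem.Set.update_cons,
      PySem.Set.update_nil, PySem.Set.add_eq_ite]

theorem pv_update_assoc (l : List String) (s t : PySem.Set String) :
    PySem.Set.update s (PySem.Set.update t l) = PySem.Set.update (PySem.Set.update s t) l := by
  induction l generalizing t with
  | nil => rw [PySem.Set.update_nil, PySem.Set.update_nil]
  | cons x l ih =>
      rw [PySem.Set.update_cons, PySem.Set.update_cons, ih, pv_update_add]

theorem pv_update_of_subset (l : List String) (u : PySem.Set String)
    (h : ∀ y ∈ l, y ∈ u) : PySem.Set.update u l = u := by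
  induction l generalizing u with
  | nil => exact PySem.Set.update_nil u
  | cons x l ih =>
      rw [PySem.Set.update_cons, PySem.Set.add_of_mem (h x (List.mem_cons_self ..))]
      exact ih u (fun y hy => h y (List.mem_cons_of_mem _ hy))

theorem pv_update_absorb (s g : PySem.Set String) :
    PySem.Set.update (PySem.Set.update s g) g = PySem.Set.update s g :=
  pv_update_of_subset g _ (fun y hy => (PySem.Set.mem_update s g y).mpr (Or.inr hy))

theorem pv_pull (b : String) (gs : List (PySem.Set String)) (s t : PySem.Set String) :
    PySem.Set.update s (gs.foldl (fun acc g => if b ∈ g then PySem.Set.update acc g else acc) t)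
      = gs.foldl (fun acc g => if b ∈ g then PySem.Set.update acc g else acc) (PySem.Set.update s t) := by
  induction gs generalizing t with
  | nil => rfl
  | cons g gs ih =>
      simp only [List.foldl_cons]
      by_cases hg : b ∈ g
      · rw [if_pos hg, if_pos hg, ih, pv_update_assoc]
      · rw [if_neg hg, if_neg hg, ih]

theorem pv_inner (b : String) (g : PySem.Set String) (l : List String)
    (d : PySem.Dict String (PySem.Set String)) :
    ((l.foldl (fun d term => d.modify term PySem.Set.empty (fun s => PySem.Set.update s g)) d).getD b PySem.Set.empty)
      = if b ∈ l then PySem.Set.update (d.getD b PySem.Set.empty) g else d.getD b PySem.Set.empty := by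
  induction l generalizing d with
  | nil => simp
  | cons t l ih =>
      simp only [List.foldl_cons]
      rw [ih]
      by_cases ht : t = b
      · subst ht
        rw [PySem.Dict.getD_modify_self]
        by_cases hb : t ∈ l
        · rw [if_pos hb, if_pos (List.mem_cons_self ..), pv_update_absorb]
        · rw [if_neg hb, if_pos (List.mem_cons_self ..)]
      · rw [PySem.Dict.getD_modify_of_ne _ _ _ (fun h : b = t => ht h.symm)]
        by_cases hb : b ∈ l
        · rw [if_pos hb, if_pos (List.mem_cons_of_mem _ hb)]
        · rw [if_neg hb, if_neg (by
            simp only [List.mem_cons, not_or, hb, and_true, not_false_eq_true]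
            exact fun h : b = t => ht h.symm)]

theorem pv_outer (b : String) (gs : List (PySem.Set String))
    (d : PySem.Dict String (PySem.Set String)) :
    ((gs.foldl (fun d g => g.foldl (fun d term => d.modify term PySem.Set.empty (fun s => PySem.Set.update s g)) d) d).getD b PySem.Set.empty)
      = gs.foldl (fun acc g => if b ∈ g then PySem.Set.update acc g else acc) (d.getD b PySem.Set.empty) := by
  induction gs generalizing d with
  | nil => rfl
  | cons g gs ih =>
      simp only [List.foldl_cons]
      rw [ih, pv_inner]

theorem expand_search_terms_spec : Claim_equal_expand_search_terms := by
  unfold Claim_equal_expand_search_terms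
  intro base_term kb _
  unfold Spec_expand_search_terms expand_search_terms expand_search_terms_alt
  simp only []
  set b := PySem.Str.lower base_term with hb
  -- flatten both nested folds to a fold over the list of groups
  have hflat : ∀ {β : Type} (f : β → PySem.Set String → β) (s : β),
      kb.foldl (fun st sec => sec.2.foldl (fun st ta => f st (pvGroup ta.1 ta.2)) st) s
        = ((kb.map (fun sec => sec.2.map (fun ta => pvGroup ta.1 ta.2))).flatten).foldl f s := by
    intro β f s
    rw [List.foldl_flatten, List.foldl_map]
    simp only [List.foldl_map]
  have hcond : ∀ (st g : PySem.Set String),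
      (if PySem.Set.contains g b then PySem.Set.update st g else st)
        = (if b ∈ g then PySem.Set.update st g else st) := by
    intro st g
    by_cases h : b ∈ g
    · rw [if_pos ((PySem.Set.contains_iff g b).mpr h), if_pos h]
    · rw [if_neg (fun hc => h ((PySem.Set.contains_iff g b).mp hc)), if_neg h]
  simp only [hcond]
  have hA := hflat (fun st g => if b ∈ g then PySem.Set.update st g else st) (PySem.Set.ofList [b])
  have hB := hflat (fun d g => g.foldl (fun d term => d.modify term PySem.Set.empty (fun s => PySem.Set.update s g)) d) PySem.Dict.empty
  simp only [] at hA hB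
  rw [hA, hB, pv_outer, PySem.Dict.getD_empty]
  simp only [PySem.Set.union]
  rw [pv_pull]
  rfl
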